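-- pv_equiv track=rewrite | github.com/Mahasreeki23/SmartSort | test/faas_client.py | map_category_to_bin
-- ===== SOURCE A (Python) =====
-- def map_category_to_bin(category):
--     category = category.lower()
--
--     if any(x in category for x in ["metal", "tweezer"]):
--         return 1
--     elif "paper" in category:
--         return 2
--     elif any(x in category for x in ["body", "organic"]):
--         return 3
--     elif any(x in category for x in ["plastic", "glove", "mask"]):
--         return 4
--     elif any(x in category for x in ["needle", "syringe", "gauze"]):
--         return 5
--
--     return 3  # default fallback
-- ===== SOURCE B (Python) =====
-- KEYWORD_BIN = {
--     "metal": 1, "tweezer": 1,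
--     "paper": 2,
--     "body": 3, "organic": 3,
--     "plastic": 4, "glove": 4, "mask": 4,
--     "needle": 5, "syringe": 5, "gauze": 5,
-- }
--
-- def map_category_to_bin(category):
--     c = category.lower()
--     matches = [b for k, b in KEYWORD_BIN.items() if k in c]
--     return min(matches, default=3)
-- ===== Notes on version B (the rewrite author's own statement) =====
-- stated objective: alternative
-- what changed: Instead of a priority-ordered first-match scan, B collects ALL bins whose keyword occurs in the string and returns the minimum (default 3); this is correct because A's rule priority coincides with ascending bin number.
import Mathlib
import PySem

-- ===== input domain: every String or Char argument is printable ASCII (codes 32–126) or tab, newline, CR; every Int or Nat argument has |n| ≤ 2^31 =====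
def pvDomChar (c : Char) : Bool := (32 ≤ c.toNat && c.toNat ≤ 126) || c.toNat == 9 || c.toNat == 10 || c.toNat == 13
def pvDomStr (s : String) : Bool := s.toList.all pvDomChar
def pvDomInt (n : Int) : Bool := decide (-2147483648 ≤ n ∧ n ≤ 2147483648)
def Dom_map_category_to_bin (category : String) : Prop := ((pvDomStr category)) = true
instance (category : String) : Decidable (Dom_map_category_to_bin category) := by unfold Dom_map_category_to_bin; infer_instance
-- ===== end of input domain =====

-- B collects ALL bins whose keyword occurs and returns their minimum (default 3), instead of A's
-- priority-ordered first-match ladder; equivalent since A's priority order is ascending bin number.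

-- ===== PORT A =====
def map_category_to_bin (category : String) : Int :=
  let c := PySem.Str.lower category
  if ["metal", "tweezer"].any (fun x => PySem.Str.isIn x c) then 1
  else if PySem.Str.isIn "paper" c then 2
  else if ["body", "organic"].any (fun x => PySem.Str.isIn x c) then 3
  else if ["plastic", "glove", "mask"].any (fun x => PySem.Str.isIn x c) then 4
  else if ["needle", "syringe", "gauze"].any (fun x => PySem.Str.isIn x c) then 5
  else 3

-- ===== PORT B =====
def pvKeywordBin : List (String × Int) :=
  [("metal", 1), ("tweezer", 1),
   ("paper", 2),
   ("body", 3), ("organic", 3),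
   ("plastic", 4), ("glove", 4), ("mask", 4),
   ("needle", 5), ("syringe", 5), ("gauze", 5)]

def map_category_to_bin_alt (category : String) : Int :=
  let c := PySem.Str.lower category
  let found := pvKeywordBin.filterMap
    (fun kb => if PySem.Str.isIn kb.1 c then some kb.2 else none)
  match PySem.List.min? found (fun x => x) with
  | some m => m
  | none => 3

-- ===== PRECONDITION & SPEC =====
def Spec_map_category_to_bin (category : String) (out : Int) : Prop := out = map_category_to_bin_alt category
instance (category : String) (out : Int) : Decidable (Spec_map_category_to_bin category out) := by unfold Spec_map_category_to_bin; infer_instance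

-- ===== CLAIM =====
def Claim_equal_map_category_to_bin : Prop := ∀ (category : String), Dom_map_category_to_bin category → Spec_map_category_to_bin category (map_category_to_bin category)

-- ===== LEMMAS AND PROOFS =====

theorem pv_foldl_min_eq (v : Int) (s : List Int) (h : ∀ y ∈ s, v ≤ y) :
    s.foldl min v = v := by
  induction s generalizing v with
  | nil => rfl
  | cons y t ih =>
    simp only [List.foldl]
    rw [min_eq_left (h y (by simp))]
    exact ih v (fun z hz => h z (by simp [hz]))

-- min of the bins surviving the filter = bin of the first surviving entry, when bins are nondecreasing.
theorem pv_min_filter_eq_find {α : Type} (p : α → Bool) (l : List (α × Int))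
    (h : l.Pairwise (fun x y => x.2 ≤ y.2)) :
    PySem.List.min? (l.filterMap (fun kb => if p kb.1 then some kb.2 else none)) (fun x => x)
      = (l.find? (fun kb => p kb.1)).map (fun kb => kb.2) := by
  induction l with
  | nil => rfl
  | cons hd t ih =>
    rcases List.pairwise_cons.mp h with ⟨hhd, ht⟩
    by_cases hb : p hd.1
    · simp only [List.find?_cons, List.filterMap_cons, hb, if_true, Option.map_some]
      rw [PySem.List.min?_id_cons]
      congr 1
      apply pv_foldl_min_eq
      intro y hy
      obtain ⟨kb, hkb, hkb2⟩ := List.mem_filterMap.mp hy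
      have hy2 : kb.2 = y := by
        by_cases h2 : p kb.1 <;> simp [h2] at hkb2 <;> simp [hkb2]
      exact hy2 ▸ hhd kb hkb
    · rw [Bool.not_eq_true] at hb
      simp only [List.find?_cons, List.filterMap_cons, hb]
      exact ih ht

theorem pv_map_or (f : (String × Int) → Int) (o o' : Option (String × Int)) :
    (o.or o').map f = (o.map f).or (o'.map f) := by
  cases o <;> rfl

theorem pv_grp (c : String) (v : Int) (ks : List String) :
    Option.map (fun kb => kb.2)
        (List.find? (fun kb => PySem.Str.isIn kb.1 c) (ks.map (fun k => (k, v))))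
      = if ks.any (fun k => PySem.Str.isIn k c) then some v else none := by
  induction ks with
  | nil => rfl
  | cons k t ih =>
    rcases Bool.eq_false_or_eq_true (PySem.Str.isIn k c) with hk | hk <;>
      simp only [List.map_cons, List.find?_cons, List.any_cons, hk, Bool.false_or, Bool.true_or,
        if_true, Option.map_some, ih]

-- ===== VERDICT =====
theorem map_category_to_bin_spec : Claim_equal_map_category_to_bin := by
  intro category _
  unfold Spec_map_category_to_bin
  simp only [map_category_to_bin, map_category_to_bin_alt, pvKeywordBin]
  rw [pv_min_filter_eq_find (fun k => PySem.Str.isIn k (PySem.Str.lower category)) _ (by decide)]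
  have hsplit : ([("metal", (1:Int)), ("tweezer", 1), ("paper", 2), ("body", 3), ("organic", 3),
      ("plastic", 4), ("glove", 4), ("mask", 4), ("needle", 5), ("syringe", 5), ("gauze", 5)]
      : List (String × Int))
      = (["metal", "tweezer"].map (fun k => (k, (1:Int))))
        ++ ((["paper"].map (fun k => (k, (2:Int))))
        ++ ((["body", "organic"].map (fun k => (k, (3:Int))))
        ++ ((["plastic", "glove", "mask"].map (fun k => (k, (4:Int))))
        ++ (["needle", "syringe", "gauze"].map (fun k => (k, (5:Int))))))) := rfl
  rw [hsplit]
  simp only [List.find?_append, pv_map_or, pv_grp, List.any_cons, List.any_nil, Bool.or_false]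
  split_ifs <;> rfl
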